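-- pv_equiv track=rewrite | github.com/Sam-Whitby/HierarchicalAssembly | run_and_plot.py | _symmetry_group
-- ===== SOURCE A (Python) =====
-- def _rot90(v):
--     """Rotate 2D vector 90° counter-clockwise."""
--     return (-v[1], v[0])
--
-- def _reflx(v):
--     """Reflect 2D vector across the x-axis."""
--     return (v[0], -v[1])
--
-- def _symmetry_group(positions):
--     """Return all ≤8 distinct dihedral transforms of a tuple of (x,y) pairs."""
--     versions = set()
--     cur = positions
--     for _ in range(4):
--         versions.add(cur)
--         versions.add(tuple(_reflx(p) for p in cur))
--         cur = tuple(_rot90(p) for p in cur)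
--     return versions
-- ===== SOURCE B (Python) =====
-- def _symmetry_group(positions):
--     """Return all ≤8 distinct dihedral transforms of a tuple of (x,y) pairs."""
--     maps = [
--         lambda x, y: (x, y),
--         lambda x, y: (x, -y),
--         lambda x, y: (-y, x),
--         lambda x, y: (-y, -x),
--         lambda x, y: (-x, -y),
--         lambda x, y: (-x, y),
--         lambda x, y: (y, -x),
--         lambda x, y: (y, x),
--     ]
--     return {tuple(m(x, y) for (x, y) in positions) for m in maps}
-- ===== Notes on version B (the rewrite author's own statement) =====
-- stated objective: simpler
-- what changed: B replaces A's stateful 4-iteration loop (threading a running rotated copy and reflecting it each step) with a stateless enumeration: the eight D4 coordinate maps are written as closed-form lambdas and each is applied directly to the untouched input.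
import Mathlib
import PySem

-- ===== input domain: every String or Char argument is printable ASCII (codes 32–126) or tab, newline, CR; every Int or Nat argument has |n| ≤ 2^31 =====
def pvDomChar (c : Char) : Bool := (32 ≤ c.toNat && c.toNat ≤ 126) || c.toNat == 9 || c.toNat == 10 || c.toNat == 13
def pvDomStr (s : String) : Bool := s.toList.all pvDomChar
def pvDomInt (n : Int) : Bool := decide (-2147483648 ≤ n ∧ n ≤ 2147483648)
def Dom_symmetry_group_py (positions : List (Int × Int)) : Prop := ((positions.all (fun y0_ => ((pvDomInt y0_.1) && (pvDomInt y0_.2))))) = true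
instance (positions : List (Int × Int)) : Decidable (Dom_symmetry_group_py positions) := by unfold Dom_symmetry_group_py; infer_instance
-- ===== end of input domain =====

-- B enumerates the eight D4 coordinate maps in closed form instead of A's stateful rotate-and-reflect loop; same values, simpler decomposition.

-- ===== PORT A =====
-- _rot90
def pvRot90 (v : Int × Int) : Int × Int := (-v.2, v.1)
-- _reflx
def pvReflx (v : Int × Int) : Int × Int := (v.1, -v.2)

def symmetry_group_py (positions : List (Int × Int)) : List (List (Int × Int)) :=
  -- versions = set(); cur = positions; for _ in range(4): add cur, add reflx(cur), cur = rot90(cur)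
  ((PySem.List.pyRange 0 4 1).foldl
    (fun (st : PySem.Set (List (Int × Int)) × List (Int × Int)) _ =>
      let versions := PySem.Set.add st.1 st.2
      let versions := PySem.Set.add versions (st.2.map pvReflx)
      (versions, st.2.map pvRot90))
    (PySem.Set.empty, positions)).1

-- ===== PORT B =====
-- the eight D4 maps, closed form, in Source B's order
def pvD4Maps : List ((Int × Int) → (Int × Int)) :=
  [ fun v => (v.1, v.2), fun v => (v.1, -v.2), fun v => (-v.2, v.1), fun v => (-v.2, -v.1),
    fun v => (-v.1, -v.2), fun v => (-v.1, v.2), fun v => (v.2, -v.1), fun v => (v.2, v.1) ]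

def symmetry_group_py_alt (positions : List (Int × Int)) : List (List (Int × Int)) :=
  PySem.Set.ofList (pvD4Maps.map (fun m => positions.map m))

-- ===== PRECONDITION & SPEC =====
def Spec_symmetry_group_py (positions : List (Int × Int)) (out : List (List (Int × Int))) : Prop := out = symmetry_group_py_alt positions
instance (positions : List (Int × Int)) (out : List (List (Int × Int))) : Decidable (Spec_symmetry_group_py positions out) := by unfold Spec_symmetry_group_py; infer_instance

-- ===== CLAIM (what is proved, stated in full; the proofs are below) =====
def Claim_equal_symmetry_group_py : Prop := ∀ (positions : List (Int × Int)), Dom_symmetry_group_py positions → Spec_symmetry_group_py positions (symmetry_group_py positions)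

-- ===== LEMMAS AND PROOFS =====

-- ===== VERDICT (by name: the statement is the Claim_ definition above) =====
theorem symmetry_group_py_spec : Claim_equal_symmetry_group_py := by
  intro positions _
  unfold Spec_symmetry_group_py symmetry_group_py symmetry_group_py_alt pvD4Maps pvRot90 pvReflx
  simp [PySem.List.pyRange, PySem.Set.ofList, PySem.Set.empty, List.range_succ,
    List.foldl, List.map_map, Function.comp_def]
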